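-- pv_equiv track=rewrite | github.com/HKUST-KnowComp/ASER | examples/postprocess_aser/atomic_utils.py | get_ppn_substitue_dict
-- ===== SOURCE A (Python) =====
-- PP_SINGLE = ['i', 'you', 'he', 'she', 'someone', 'guy', 'man', 'woman', 'somebody']
--
-- ATOMIC_SUBJS = ["PersonX", "PersonY", "PersonZ"]
--
-- def get_ppn_substitute_dict_head(head_split):
--   atomic_head_pp_list = []
--   for token in head_split:
--     if token in PP_SINGLE:
--       if not token in atomic_head_pp_list:
--         atomic_head_pp_list.append(token)
--   head_pp2atomic_pp = {}
--   cnt = 0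
--   for pp in atomic_head_pp_list:
--     head_pp2atomic_pp[pp] = ATOMIC_SUBJS[cnt]
--     cnt += 1
--     if cnt >= len(ATOMIC_SUBJS):
--       break
--   return head_pp2atomic_pp
--
-- def get_ppn_substitue_dict(head_split, tail_split):
--   """
--       input (list): the split result of a head
--
--       output: a dict tha maps personal pronouns in
--               head_split to subjects in ATOMIC_SUBJS
--   """
--
--   head_subj = head_split[0]
--   tail_subj = tail_split[0]
--
--   if head_subj == tail_subj:
--     if head_subj in PP_SINGLE:
--       return get_ppn_substitute_dict_head(head_split + tail_split)
--     else:
--       # neither in PP_SINGLE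
--       return {}
--   else:
--     # head_subj != tail_subj
--     if head_subj in PP_SINGLE and tail_subj not in PP_SINGLE:
--       return get_ppn_substitute_dict_head(head_split + tail_split)
--     elif head_subj not in PP_SINGLE and tail_subj not in PP_SINGLE:
--       return {}
--     elif head_subj in PP_SINGLE and tail_subj in PP_SINGLE:
--       head_pp2atomic_pp = get_ppn_substitute_dict_head(head_split + tail_split)
--       pp_list = [[key for key, atomic_subj in head_pp2atomic_pp.items() if atomic_subj == ATOMIC_SUBJS[i]][0]\
--                  for i in range(len(head_pp2atomic_pp))
--                 ]
--       num_subj = len(head_pp2atomic_pp)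
--       new_pp_dict = {}
--       new_pp_dict[head_subj] = ATOMIC_SUBJS[0]
--       new_pp_dict[tail_subj] = ATOMIC_SUBJS[1]
--       pp_list.remove(head_subj)
--       if tail_subj in pp_list:
--         pp_list.remove(tail_subj)
--       if len(pp_list) > 0:
--         new_pp_dict[pp_list[0]] = ATOMIC_SUBJS[2]
--       return new_pp_dict
--     elif head_subj not in PP_SINGLE and tail_subj in PP_SINGLE:
--       return get_ppn_substitute_dict_head(head_split + tail_split)
-- ===== SOURCE B (Python) =====
-- PP_SINGLE = ['i', 'you', 'he', 'she', 'someone', 'guy', 'man', 'woman', 'somebody']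
--
-- ATOMIC_SUBJS = ["PersonX", "PersonY", "PersonZ"]
--
-- def _walk(tokens, subjs, seen):
--     # recursively pair unseen pronouns with the remaining subject labels
--     if not tokens or not subjs:
--         return {}
--     t = tokens[0]
--     if t in PP_SINGLE and t not in seen:
--         d = {t: subjs[0]}
--         d.update(_walk(tokens[1:], subjs[1:], seen | {t}))
--         return d
--     return _walk(tokens[1:], subjs, seen)
--
-- def get_ppn_substitue_dict(head_split, tail_split):
--     head_subj = head_split[0]
--     tail_subj = tail_split[0]
--     head_is_pp = head_subj in PP_SINGLE
--     tail_is_pp = tail_subj in PP_SINGLE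
--     if not head_is_pp and not tail_is_pp:
--         return {}
--     if head_is_pp and tail_is_pp and head_subj != tail_subj:
--         stream = [head_subj, tail_subj] + head_split + tail_split
--     else:
--         stream = head_split + tail_split
--     return _walk(stream, ATOMIC_SUBJS, set())
-- ===== Notes on version B (the rewrite author's own statement) =====
-- stated objective: alternative
-- what changed: B replaces A's three-stage construction (collect a pronoun list, number it into a dict, then invert/reorder/rebuild the dict in the both-pronoun branch) by one recursive walk that consumes the token stream and the subject-label list in parallel, pairing each unseen pronoun with the next label; the both-pronoun reorder is obtained by merely prepending the two subjects to the stream.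
import Mathlib
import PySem

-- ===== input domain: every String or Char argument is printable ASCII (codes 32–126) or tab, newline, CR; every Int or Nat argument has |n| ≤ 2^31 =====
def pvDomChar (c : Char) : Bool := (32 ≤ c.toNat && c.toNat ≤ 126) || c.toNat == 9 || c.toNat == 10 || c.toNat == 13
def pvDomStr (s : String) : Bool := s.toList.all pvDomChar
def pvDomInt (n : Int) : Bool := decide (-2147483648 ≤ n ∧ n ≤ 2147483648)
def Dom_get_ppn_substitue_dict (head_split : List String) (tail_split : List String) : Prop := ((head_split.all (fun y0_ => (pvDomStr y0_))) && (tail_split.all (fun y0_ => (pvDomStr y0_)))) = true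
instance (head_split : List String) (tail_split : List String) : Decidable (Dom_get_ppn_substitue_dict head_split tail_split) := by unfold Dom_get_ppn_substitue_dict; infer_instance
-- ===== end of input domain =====

-- B builds the dict by a single recursive walk pairing each unseen pronoun of the token stream with the
-- next subject label (the both-pronoun reorder becomes a two-token stream prefix) — objective: alternative.

-- ===== PORT A =====
def pvPP : List String := ["i", "you", "he", "she", "someone", "guy", "man", "woman", "somebody"]

def pvSUBJ : List String := ["PersonX", "PersonY", "PersonZ"]

-- step of the 'for token in head_split: if token in PP_SINGLE and not token in atomic_head_pp_list: append'
def pvStepU (acc : List String) (token : String) : List String :=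
  if pvPP.contains token && !(acc.contains token) then acc ++ [token] else acc

-- atomic_head_pp_list of get_ppn_substitute_dict_head
def pvHeadList (l : List String) : List String := l.foldl pvStepU []

-- second loop of get_ppn_substitute_dict_head: cnt counter, break once cnt >= len(ATOMIC_SUBJS)
def pvHeadLoop : List String → PySem.Dict String String → Int → PySem.Dict String String
  | [], d, _ => d
  | pp :: rest, d, cnt =>
    let d' := d.insert pp ((PySem.List.pyGet? pvSUBJ cnt).getD "")
    let cnt' := cnt + 1
    if 3 ≤ cnt' then d' else pvHeadLoop rest d' cnt'

def pvHeadDict (l : List String) : PySem.Dict String String :=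
  pvHeadLoop (pvHeadList l) PySem.Dict.empty 0

def get_ppn_substitue_dict (head_split : List String) (tail_split : List String) : List (String × String) :=
  -- head_split[0] / tail_split[0]: IndexError on an empty list is excluded by Pre_; the .getD "" is never reached there
  let head_subj := (PySem.List.pyGet? head_split 0).getD ""
  let tail_subj := (PySem.List.pyGet? tail_split 0).getD ""
  if head_subj == tail_subj then
    if pvPP.contains head_subj then (pvHeadDict (head_split ++ tail_split)).items
    else []
  else if pvPP.contains head_subj && !(pvPP.contains tail_subj) then
    (pvHeadDict (head_split ++ tail_split)).items
  else if !(pvPP.contains head_subj) && !(pvPP.contains tail_subj) then []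
  else if pvPP.contains head_subj && pvPP.contains tail_subj then
    let d := pvHeadDict (head_split ++ tail_split)
    let pp_list := (PySem.List.pyRange 0 d.size 1).map (fun i =>
      (PySem.List.pyGet? ((d.items.filter (fun kv => kv.2 == (PySem.List.pyGet? pvSUBJ i).getD "")).map Prod.fst) 0).getD "")
    let new_d := ((PySem.Dict.empty : PySem.Dict String String).insert head_subj
        ((PySem.List.pyGet? pvSUBJ 0).getD "")).insert tail_subj ((PySem.List.pyGet? pvSUBJ 1).getD "")
    -- pp_list.remove(head_subj): ValueError impossible (head_subj is always present), .getD keeps the list shape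
    let pp_list := (PySem.List.remove? pp_list head_subj).getD pp_list
    let pp_list := if pp_list.contains tail_subj then (PySem.List.remove? pp_list tail_subj).getD pp_list else pp_list
    if 0 < pp_list.length then
      (new_d.insert ((PySem.List.pyGet? pp_list 0).getD "") ((PySem.List.pyGet? pvSUBJ 2).getD "")).items
    else new_d.items
  else if !(pvPP.contains head_subj) && pvPP.contains tail_subj then
    (pvHeadDict (head_split ++ tail_split)).items
  else []  -- unreachable: the Python elif chain is exhaustive here

-- ===== PORT B =====
-- _walk(tokens, subjs, seen): pair each unseen pronoun with the next subject label, recursively;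
-- d.update(rest) is ported as the fold of insert over the recursive result's items
def pvWalk : List String → List String → PySem.Set String → PySem.Dict String String
  | [], _, _ => PySem.Dict.empty
  | t :: rest, subjs, seen =>
    match subjs with
    | [] => PySem.Dict.empty
    | s :: ss =>
      if pvPP.contains t && !(seen.contains t) then
        ((pvWalk rest ss (PySem.Set.add seen t)).items).foldl
          (fun d p => d.insert p.1 p.2)
          ((PySem.Dict.empty : PySem.Dict String String).insert t s)
      else pvWalk rest (s :: ss) seen

def get_ppn_substitue_dict_alt (head_split : List String) (tail_split : List String) : List (String × String) :=
  let head_subj := (PySem.List.pyGet? head_split 0).getD ""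
  let tail_subj := (PySem.List.pyGet? tail_split 0).getD ""
  let head_is_pp := pvPP.contains head_subj
  let tail_is_pp := pvPP.contains tail_subj
  if !head_is_pp && !tail_is_pp then []
  else
    let stream :=
      if head_is_pp && tail_is_pp && !(head_subj == tail_subj) then
        [head_subj, tail_subj] ++ head_split ++ tail_split
      else head_split ++ tail_split
    (pvWalk stream pvSUBJ PySem.Set.empty).items

-- ===== PRECONDITION & SPEC =====
-- Pre_ excludes only inputs where the Python A raises IndexError: an empty head_split or tail_split.
def Pre_get_ppn_substitue_dict (head_split : List String) (tail_split : List String) : Prop :=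
  head_split ≠ [] ∧ tail_split ≠ []
instance (head_split : List String) (tail_split : List String) : Decidable (Pre_get_ppn_substitue_dict head_split tail_split) := by unfold Pre_get_ppn_substitue_dict; infer_instance

def pvWitness_get_ppn_substitue_dict : List String × List String := (["i", "saw", "him"], ["he", "ran"])

def Spec_get_ppn_substitue_dict (head_split : List String) (tail_split : List String) (out : List (String × String)) : Prop := out = get_ppn_substitue_dict_alt head_split tail_split
instance (head_split : List String) (tail_split : List String) (out : List (String × String)) : Decidable (Spec_get_ppn_substitue_dict head_split tail_split out) := by unfold Spec_get_ppn_substitue_dict; infer_instance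

-- ===== CLAIM (what is proved, stated in full; the proofs are below) =====
def Claim_equal_get_ppn_substitue_dict : Prop := ∀ (head_split : List String) (tail_split : List String), Dom_get_ppn_substitue_dict head_split tail_split → Pre_get_ppn_substitue_dict head_split tail_split → Spec_get_ppn_substitue_dict head_split tail_split (get_ppn_substitue_dict head_split tail_split)

-- ===== LEMMAS AND PROOFS =====

def pvMk : List String → List (String × String)
  | [] => []
  | [a] => [(a, "PersonX")]
  | [a, b] => [(a, "PersonX"), (b, "PersonY")]
  | a :: b :: c :: _ => [(a, "PersonX"), (b, "PersonY"), (c, "PersonZ")]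

theorem pvMk_eq_zip (xs : List String) : pvMk xs = List.zip xs pvSUBJ := by
  match xs with
  | [] => rfl
  | [a] => rfl
  | [a, b] => rfl
  | a :: b :: c :: rest => simp [pvMk, pvSUBJ, List.zip_nil_right]

theorem pvHeadLoop_items (xs : List String) (h : xs.Nodup) :
    (pvHeadLoop xs PySem.Dict.empty 0).items = pvMk xs := by
  match xs, h with
  | [], _ => rfl
  | [a], _ => rfl
  | [a, b], h =>
    have hab : a ≠ b := by simp [List.nodup_cons] at h; tauto
    simp [pvHeadLoop, pvMk, PySem.Dict.items_insert_of_not_contains,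
      PySem.Dict.contains_insert, PySem.Dict.contains_empty, hab, Ne.symm hab,
      PySem.List.pyGet?, PySem.List.pyIdx?, pvSUBJ, PySem.Dict.empty]
  | a :: b :: c :: rest, h =>
    have hab : a ≠ b := by simp [List.nodup_cons] at h; tauto
    have hac : a ≠ c := by simp [List.nodup_cons] at h; tauto
    have hbc : b ≠ c := by simp [List.nodup_cons] at h; tauto
    simp [pvHeadLoop, pvMk, PySem.Dict.items_insert_of_not_contains,
      PySem.Dict.contains_insert, PySem.Dict.contains_empty, hab, Ne.symm hab, Ne.symm hac, Ne.symm hbc,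
      PySem.List.pyGet?, PySem.List.pyIdx?, pvSUBJ, PySem.Dict.empty]

theorem pvHead0 (x : String) (l : List String) : (PySem.List.pyGet? (x :: l) 0).getD "" = x := by
  simp [PySem.List.pyGet?, PySem.List.pyIdx?, pvSUBJ]

theorem pvRecon (xs : List String) :
    (PySem.List.pyRange 0 ((pvMk xs).length : Int) 1).map (fun i =>
      (PySem.List.pyGet?
        (List.map Prod.fst
          (List.filter (fun kv => kv.2 == (PySem.List.pyGet? pvSUBJ i).getD "") (pvMk xs))) 0).getD "")
    = xs.take 3 := by
  match xs with
  | [] => rfl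
  | [a] =>
    have hl : ((pvMk [a]).length : Int) = 1 := by simp [pvMk]
    rw [hl, show PySem.List.pyRange 0 1 1 = [0] from by decide]
    simp [pvMk, PySem.List.pyGet?, PySem.List.pyIdx?, pvSUBJ]
  | [a, b] =>
    have hl : ((pvMk [a, b]).length : Int) = 2 := by simp [pvMk]
    rw [hl, show PySem.List.pyRange 0 2 1 = [0, 1] from by decide]
    simp [pvMk, PySem.List.pyGet?, PySem.List.pyIdx?, pvSUBJ]
  | a :: b :: c :: rest =>
    have hl : ((pvMk (a :: b :: c :: rest)).length : Int) = 3 := by simp [pvMk]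
    rw [hl, show PySem.List.pyRange 0 3 1 = [0, 1, 2] from by decide]
    simp [pvMk, PySem.List.pyGet?, PySem.List.pyIdx?, pvSUBJ]

theorem pvStepU_eq_pos {acc : List String} {t : String}
    (h : (pvPP.contains t && !(acc.contains t)) = true) : pvStepU acc t = acc ++ [t] := by
  unfold pvStepU; rw [if_pos h]

theorem pvStepU_eq_neg {acc : List String} {t : String}
    (h : ¬ (pvPP.contains t && !(acc.contains t)) = true) : pvStepU acc t = acc := by
  unfold pvStepU; rw [if_neg h]

-- B-side abstraction: the ordered list of first occurrences of pronouns not yet 'seen'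
def pvDs : List String → (String → Bool) → List String
  | [], _ => []
  | t :: r, seen =>
    if pvPP.contains t && !(seen t) then t :: pvDs r (fun x => seen x || x == t)
    else pvDs r seen

theorem pvDs_congr (l : List String) {f g : String → Bool} (h : ∀ x, f x = g x) :
    pvDs l f = pvDs l g := by
  induction l generalizing f g with
  | nil => rfl
  | cons t r ih =>
    simp only [pvDs, h t]
    split
    · exact congrArg _ (ih (fun x => by rw [h x]))
    · exact ih h

theorem pvDs_mem {l : List String} {seen : String → Bool} {x : String}
    (hx : x ∈ pvDs l seen) : seen x = false := by
  induction l generalizing seen with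
  | nil => cases hx
  | cons t r ih =>
    by_cases hc : (pvPP.contains t && !(seen t)) = true
    · rw [pvDs, if_pos hc] at hx
      rcases List.mem_cons.mp hx with rfl | hx'
      · simp only [Bool.and_eq_true, Bool.not_eq_true'] at hc
        exact hc.2
      · exact (Bool.or_eq_false_iff.mp (ih hx')).1
    · rw [pvDs, if_neg hc] at hx; exact ih hx

theorem pvDs_mem_of {l : List String} {seen : String → Bool} {x : String}
    (hp : x ∈ pvPP) (hl : x ∈ l) (hs : seen x = false) : x ∈ pvDs l seen := by
  induction l generalizing seen with
  | nil => cases hl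
  | cons t r ih =>
    rw [pvDs]
    by_cases hc : (pvPP.contains t && !(seen t)) = true
    · rw [if_pos hc]
      rcases List.mem_cons.mp hl with rfl | hl'
      · exact List.mem_cons_self
      · by_cases hxt : x = t
        · subst hxt; exact List.mem_cons_self
        · exact List.mem_cons_of_mem _ (ih hl' (by simp [hs, hxt]))
    · rw [if_neg hc]
      rcases List.mem_cons.mp hl with rfl | hl'
      · exact absurd (by simp [List.contains_eq_mem, hp, hs]) hc
      · exact ih hl' hs

theorem pvDs_nodup (l : List String) (seen : String → Bool) : (pvDs l seen).Nodup := by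
  induction l generalizing seen with
  | nil => exact List.nodup_nil
  | cons t r ih =>
    rw [pvDs]
    split
    · refine List.nodup_cons.mpr ⟨?_, ih _⟩
      intro hmem
      have := pvDs_mem hmem
      simp at this
    · exact ih seen

theorem pvHeadList_eq_ds (l : List String) (acc : List String) :
    l.foldl pvStepU acc = acc ++ pvDs l (fun x => acc.contains x) := by
  induction l generalizing acc with
  | nil => simp [pvDs]
  | cons t r ih =>
    rw [List.foldl_cons, pvDs]
    by_cases hc : (pvPP.contains t && !(acc.contains t)) = true
    · rw [if_pos hc, pvStepU_eq_pos hc, ih (acc ++ [t]), List.append_assoc]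
      congr 1
      rw [List.singleton_append]
      congr 1
      exact pvDs_congr r (fun x => by
        simp [List.contains_eq_mem, List.mem_append, beq_eq_decide])
    · rw [if_neg hc, pvStepU_eq_neg hc]
      exact ih acc

theorem pvHeadList_ds (l : List String) : pvHeadList l = pvDs l (fun _ => false) := by
  rw [pvHeadList, pvHeadList_eq_ds l [], List.nil_append]
  exact pvDs_congr l (fun x => by simp [List.contains_eq_mem])

theorem pvZipFst (l l' : List String) : (List.zip l l').map Prod.fst = l.take l'.length := by
  induction l generalizing l' with
  | nil => simp
  | cons x r ih =>
    cases l' with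
    | nil => simp
    | cons y r' => simp [List.zip_cons_cons, ih r']

theorem pvWalk_items (tokens : List String) (subjs : List String) (seen : PySem.Set String) :
    (pvWalk tokens subjs seen).items = List.zip (pvDs tokens (fun x => seen.contains x)) subjs := by
  induction tokens generalizing subjs seen with
  | nil => simp [pvWalk, pvDs, PySem.Dict.empty, PySem.Dict.items]
  | cons t r ih =>
    cases subjs with
    | nil => simp [pvWalk, List.zip_nil_right, PySem.Dict.empty, PySem.Dict.items]
    | cons s ss =>
      rw [pvWalk, pvDs]
      by_cases hc : (pvPP.contains t && !((seen : PySem.Set String).contains t)) = true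
      · rw [if_pos hc, if_pos hc, ih ss (PySem.Set.add seen t),
          pvDs_congr r (fun x => show (PySem.Set.add seen t).contains x = (seen.contains x || x == t) by
            simp [pysem, beq_eq_decide])]
        set ds' := pvDs r (fun x => seen.contains x || x == t) with hds'
        have hkeys : (List.map Prod.fst (List.zip ds' ss)) = ds'.take ss.length := pvZipFst ds' ss
        have hfree : ∀ p ∈ List.zip ds' ss,
            (((PySem.Dict.empty : PySem.Dict String String).insert t s)).contains p.1 = false := by
          intro p hp
          have h1 : p.1 ∈ ds' := by
            have : p.1 ∈ List.map Prod.fst (List.zip ds' ss) := List.mem_map_of_mem hp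
            rw [hkeys] at this
            exact List.mem_of_mem_take this
          have h2 := pvDs_mem h1
          have h3 : (p.1 == t) = false := (Bool.or_eq_false_iff.mp h2).2
          have h4 : p.1 ≠ t := by simpa using h3
          simp [pysem, h4]
        have hnd : (List.map Prod.fst (List.zip ds' ss)).Nodup := by
          rw [hkeys]
          exact (pvDs_nodup r _).sublist (List.take_sublist _ _)
        have hfold := PySem.Dict.items_foldl_insert_fresh
          (l := List.zip ds' ss) (d := ((PySem.Dict.empty : PySem.Dict String String).insert t s))
          (k := Prod.fst) (v := Prod.snd) (fun a ha => hfree a ha) hnd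
        simp only at hfold
        rw [show (fun (d : PySem.Dict String String) (p : String × String) => d.insert p.1 p.2)
              = (fun (d : PySem.Dict String String) (a : String × String) => d.insert a.1 a.2) from rfl]
        rw [hfold]
        rw [PySem.Dict.items_insert_of_not_contains _ _ (by simp [pysem])]
        simp [PySem.Dict.empty, PySem.Dict.items, List.zip_cons_cons]
      · rw [if_neg hc, if_neg hc]
        exact ih (s :: ss) seen

theorem pvDs_union_filter (l : List String) (S T : String → Bool) :
    pvDs l (fun x => S x || T x) = (pvDs l S).filter (fun x => !(T x)) := by
  induction l generalizing S with
  | nil => rfl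
  | cons t r ih =>
    rw [pvDs, pvDs]
    by_cases hS : (pvPP.contains t && !(S t)) = true
    · rw [if_pos hS]
      by_cases hT : T t = true
      · rw [if_neg (by simp [hT])]
        simp only [List.filter_cons, hT, Bool.not_true, Bool.false_eq_true, if_false]
        rw [← ih (fun x => S x || x == t)]
        exact pvDs_congr r (fun x => by
          by_cases hx : x = t
          · subst hx; simp [hT]
          · simp [beq_eq_false_iff_ne.mpr hx])
      · have hTf : T t = false := by simpa using hT
        rw [if_pos (by simp_all)]
        simp only [List.filter_cons, hTf, Bool.not_false, if_true]
        congr 1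
        rw [← ih (fun x => S x || x == t)]
        exact pvDs_congr r (fun x => by cases hSx : S x <;> cases hTx : T x <;> simp [hSx, hTx])
    · rw [if_neg hS, if_neg (by
        intro h
        simp only [Bool.and_eq_true, Bool.not_eq_true', Bool.or_eq_false_iff] at h
        exact hS (by rw [h.1, h.2.1]; rfl))]
      exact ih S

theorem pvRemoveFilter (l : List String) (b : String) (h : l.Nodup) :
    (if decide (b ∈ l) = true then (PySem.List.remove? l b).getD l else l)
      = l.filter (fun x => !(x == b)) := by
  by_cases hb : b ∈ l
  · rw [if_pos (by simpa using hb), PySem.List.remove?_eq_some_erase l b hb, Option.getD_some,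
      List.Nodup.erase_eq_filter h]
    simp [bne]
  · rw [if_neg (by simpa using hb)]
    symm
    rw [List.filter_eq_self]
    intro x hx
    rcases eq_or_ne x b with rfl | hne
    · exact absurd hx hb
    · simp [hne]

theorem pvTakeFilterHead (e : List String) (b : String) (he : e.Nodup) (hb : b ∈ e) :
    ((e.take 2).filter (fun x => !(x == b))).head? = (e.filter (fun x => !(x == b))).head? := by
  cases e with
  | nil => cases hb
  | cons x rest =>
    have hfid : ∀ (l : List String), b ∉ l → l.filter (fun x => !(x == b)) = l := by
      intro l hl
      rw [List.filter_eq_self]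
      intro c hc
      rcases eq_or_ne c b with rfl | hne
      · exact absurd hc hl
      · simp [hne]
    by_cases hx : x = b
    · subst hx
      have hnr : x ∉ rest := (List.nodup_cons.mp he).1
      rw [show (x :: rest).take 2 = x :: rest.take 1 from rfl]
      simp only [List.filter_cons, beq_self_eq_true, Bool.not_true, Bool.false_eq_true, if_false]
      rw [hfid _ (fun hm => hnr (List.mem_of_mem_take hm)), hfid _ hnr]
      cases rest <;> rfl
    · have hxb : (!(x == b)) = true := by simp [hx]
      rw [show (x :: rest).take 2 = x :: rest.take 1 from rfl]
      simp [List.filter_cons, hxb]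

theorem pvEmptySeen (x : String) : (PySem.Set.empty : PySem.Set String).contains x = false := by
  simp [PySem.Set.contains, PySem.Set.empty]

theorem pvWalkStream (stream : List String) :
    (pvWalk stream pvSUBJ PySem.Set.empty).items = List.zip (pvDs stream (fun _ => false)) pvSUBJ := by
  rw [pvWalk_items]
  exact congrArg (fun z => List.zip z pvSUBJ) (pvDs_congr stream (fun x => pvEmptySeen x))

set_option maxHeartbeats 2000000 in
theorem pvMain (hs ts : List String) (h1 : hs ≠ []) (h2 : ts ≠ []) :
    get_ppn_substitue_dict hs ts = get_ppn_substitue_dict_alt hs ts := by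
  obtain ⟨a, hs', rfl⟩ := List.exists_cons_of_ne_nil h1
  obtain ⟨b, ts', rfl⟩ := List.exists_cons_of_ne_nil h2
  have hnodup : (pvHeadList ((a :: hs') ++ (b :: ts'))).Nodup := by
    rw [pvHeadList_ds]; exact pvDs_nodup _ _
  have hA : (pvHeadDict ((a :: hs') ++ (b :: ts'))).items = pvMk (pvHeadList ((a :: hs') ++ (b :: ts'))) :=
    pvHeadLoop_items _ hnodup
  have hNormal : (pvWalk ((a :: hs') ++ (b :: ts')) pvSUBJ PySem.Set.empty).items
      = pvMk (pvHeadList ((a :: hs') ++ (b :: ts'))) := by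
    rw [pvWalkStream, ← pvHeadList_ds, pvMk_eq_zip]
  by_cases hp : a ∈ pvPP <;> by_cases tp : b ∈ pvPP <;> by_cases hab : a = b
  · -- a ∈ PP, b ∈ PP, a = b
    subst hab
    simp only [get_ppn_substitue_dict, get_ppn_substitue_dict_alt, pvHead0]
    simp only [List.contains_eq_mem, hp, beq_self_eq_true, if_true, decide_true, Bool.not_true,
      Bool.and_self, Bool.and_false, Bool.false_and, Bool.not_false, Bool.false_eq_true, if_false]
    rw [hA, hNormal]
  · -- a, b ∈ PP, a ≠ b : the reordering branch
    have hba : b ≠ a := Ne.symm hab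
    -- the distinct-pronoun tail after the leading head_subj
    set e := pvDs (hs' ++ b :: ts') (fun x => x == a) with hedef
    have hLae : pvHeadList ((a :: hs') ++ (b :: ts')) = a :: e := by
      show ((a :: hs') ++ (b :: ts')).foldl pvStepU [] = _
      rw [List.cons_append, List.foldl_cons,
        pvStepU_eq_pos (by simp [List.contains_eq_mem, hp]), List.nil_append,
        pvHeadList_eq_ds (hs' ++ b :: ts') [a], List.singleton_append]
      congr 1
      exact pvDs_congr _ (fun x => by simp [List.contains_eq_mem, beq_eq_decide])
    have he : e.Nodup := pvDs_nodup _ _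
    have hae : a ∉ e := by
      intro h
      have := pvDs_mem h
      simp at this
    have hbe : b ∈ e := by
      refine pvDs_mem_of tp (by simp) ?_
      simp [hba]
    -- B's stream evaluates to a :: b :: (e minus b)
    have hBds : pvDs ([a, b] ++ (a :: hs') ++ (b :: ts')) (fun _ => false)
        = a :: b :: e.filter (fun x => !(x == b)) := by
      show pvDs (a :: b :: a :: (hs' ++ b :: ts')) (fun _ => false) = _
      rw [pvDs, if_pos (by simp [List.contains_eq_mem, hp])]
      rw [pvDs, if_pos (by simp [List.contains_eq_mem, tp, hba])]
      rw [pvDs, if_neg (by simp)]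
      congr 2
      rw [pvDs_congr (hs' ++ b :: ts')
        (g := fun x => (x == a) || (x == b)) (fun x => by simp),
        pvDs_union_filter (hs' ++ b :: ts') (fun x => x == a) (fun x => x == b), ← hedef]
    simp only [get_ppn_substitue_dict, get_ppn_substitue_dict_alt, pvHead0]
    have hne : (a == b) = false := by simp [hab]
    simp only [hne, List.contains_eq_mem, hp, tp, decide_true, Bool.not_true, Bool.not_false,
      Bool.and_true, Bool.true_and, Bool.and_false, Bool.false_and, Bool.false_eq_true, if_false,
      if_true, Bool.true_eq_false]
    rw [pvWalk_items, pvDs_congr _ (fun x => pvEmptySeen x), hBds]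
    simp only [PySem.Dict.size, hA, hLae]
    rw [pvRecon (a :: e), show (a :: e).take 3 = a :: e.take 2 from rfl]
    simp only [PySem.List.remove?_cons_self, Option.getD_some]
    have hX : (PySem.List.pyGet? pvSUBJ 0).getD "" = "PersonX" := by decide
    have hY : (PySem.List.pyGet? pvSUBJ 1).getD "" = "PersonY" := by decide
    have hZ : (PySem.List.pyGet? pvSUBJ 2).getD "" = "PersonZ" := by decide
    rw [hX, hY, hZ]
    have ht2 : (e.take 2).Nodup := he.sublist (List.take_sublist _ _)
    rw [pvRemoveFilter (e.take 2) b ht2]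
    have hq := pvTakeFilterHead e b he hbe
    -- compare via the shared head of the filtered remainders
    cases hf : e.filter (fun x => !(x == b)) with
    | nil =>
      rw [hf] at hq
      have hqnil : (e.take 2).filter (fun x => !(x == b)) = [] := List.head?_eq_none_iff.mp hq
      rw [hqnil]
      simp only [List.length_nil, lt_self_iff_false, if_false]
      rw [PySem.Dict.items_insert_of_not_contains _ _ (by simp [pysem, beq_eq_decide, hba]),
        PySem.Dict.items_insert_of_not_contains _ _ (by simp [pysem])]
      simp [PySem.Dict.empty, PySem.Dict.items, pvSUBJ, List.zip_cons_cons]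
    | cons z f' =>
      rw [hf] at hq
      cases hcq : (e.take 2).filter (fun x => !(x == b)) with
      | nil => rw [hcq] at hq; simp at hq
      | cons z0 q' =>
        rw [hcq] at hq
        have hz0 : z0 = z := by simpa using hq
        subst hz0
        have hzmem : z0 ∈ e.filter (fun x => !(x == b)) := by
          rw [hf]; exact List.mem_cons_self
        have hze : z0 ∈ e := (List.mem_filter.mp hzmem).1
        have hzb : z0 ≠ b := by
          have := (List.mem_filter.mp hzmem).2
          simpa using this
        have hza : z0 ≠ a := fun h => hae (h ▸ hze)
        simp only [List.length_cons, Nat.zero_lt_succ, if_true, pvHead0]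
        rw [PySem.Dict.items_insert_of_not_contains _ _ (by simp [pysem, hza, hzb, hba])]
        rw [PySem.Dict.items_insert_of_not_contains _ _ (by simp [pysem, beq_eq_decide, hba]),
          PySem.Dict.items_insert_of_not_contains _ _ (by simp [pysem])]
        simp [PySem.Dict.empty, PySem.Dict.items, pvSUBJ, List.zip_cons_cons, List.zip_nil_right]
  · -- a ∈ PP, b ∉ PP, a = b : contradiction
    exact (tp (hab ▸ hp)).elim
  · -- a ∈ PP, b ∉ PP, a ≠ b
    simp only [get_ppn_substitue_dict, get_ppn_substitue_dict_alt, pvHead0]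
    rw [if_neg (by simp [hab]), if_pos (by simp [List.contains_eq_mem, hp, tp])]
    rw [if_neg (by simp [List.contains_eq_mem, hp])]
    rw [if_neg (by simp [List.contains_eq_mem, tp]), hA, hNormal]
  · -- a ∉ PP, b ∈ PP, a = b : contradiction
    exact (hp (hab ▸ tp)).elim
  · -- a ∉ PP, b ∈ PP, a ≠ b
    simp only [get_ppn_substitue_dict, get_ppn_substitue_dict_alt, pvHead0]
    rw [if_neg (by simp [hab]), if_neg (by simp [List.contains_eq_mem, hp])]
    rw [if_neg (by simp [List.contains_eq_mem, hp]; exact tp), if_neg (by simp [List.contains_eq_mem, hp])]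
    rw [if_pos (by simp [List.contains_eq_mem, hp]; exact tp)]
    rw [if_neg (by simp [List.contains_eq_mem, hp]; exact tp)]
    rw [if_neg (by simp [List.contains_eq_mem, hp]), hA, hNormal]
  · -- a ∉ PP, b ∉ PP, a = b
    subst hab
    simp only [get_ppn_substitue_dict, get_ppn_substitue_dict_alt, pvHead0]
    rw [if_pos (by simp), if_neg (by simp [List.contains_eq_mem, hp]),
      if_pos (by simp [List.contains_eq_mem, hp])]
  · -- a ∉ PP, b ∉ PP, a ≠ b
    simp only [get_ppn_substitue_dict, get_ppn_substitue_dict_alt, pvHead0]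
    rw [if_neg (by simp [hab]), if_neg (by simp [List.contains_eq_mem, hp]),
      if_pos (by simp [List.contains_eq_mem, hp, tp]), if_pos (by simp [List.contains_eq_mem, hp, tp])]

-- ===== VERDICT (by name: the statement is the Claim_ definition above) =====
theorem get_ppn_substitue_dict_spec : Claim_equal_get_ppn_substitue_dict := by
  intro head_split tail_split _ hpre
  unfold Spec_get_ppn_substitue_dict
  exact pvMain head_split tail_split hpre.1 hpre.2
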